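-- pv_equiv track=rewrite | github.com/freemanhm/Recsys17 | hmf/run_hmf.py | process_rec_single_user_online_round
-- ===== SOURCE A (Python) =====
-- def process_rec_single_user_online_round(recs):
--     user_item_ranks = {}
--     for item, users in recs.items():
--         rank = 0
--         for user in users:
--             rank += 1
--             if user in user_item_ranks:
--                 best_rank = user_item_ranks[user][1]
--                 if rank < best_rank:
--                     user_item_ranks[user] = [item, rank]
--             else:
--                 user_item_ranks[user] = [item, rank]
--     for item in recs.keys():
--         rec_list = []
--         for user in recs[item]:
--             if item == user_item_ranks[user][0]:
--                 rec_list.append(user)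
--         recs[item] = rec_list
--     return recs
-- ===== SOURCE B (Python) =====
-- def process_rec_single_user_online_round(recs):
--     # Group every occurrence of a user as (rank, item) per user, then reduce
--     # with min by rank (first minimum wins, matching the strict '<' of the
--     # online version); finally rebuild each item's list in place.
--     per_user = {}
--     for item, users in recs.items():
--         for rank, user in enumerate(users, 1):
--             per_user.setdefault(user, []).append((rank, item))
--     winner = {u: min(lst, key=lambda t: t[0])[1] for u, lst in per_user.items()}
--     for item in recs:
--         recs[item] = [u for u in recs[item] if winner[u] == item]
--     return recs
-- ===== Notes on version B (the rewrite author's own statement) =====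
-- stated objective: alternative
-- what changed: Replaces A's online best-rank tracking (a dict updated under a strict '<' while walking each list with a manual rank counter) by a two-phase decomposition: first group all (rank, item) occurrences per user with enumerate, then pick each user's winning item with min(..., key=rank) whose first-minimum tie-break reproduces A's strict '<'; the final in-place rebuild of recs is a comprehension.
import Mathlib
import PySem

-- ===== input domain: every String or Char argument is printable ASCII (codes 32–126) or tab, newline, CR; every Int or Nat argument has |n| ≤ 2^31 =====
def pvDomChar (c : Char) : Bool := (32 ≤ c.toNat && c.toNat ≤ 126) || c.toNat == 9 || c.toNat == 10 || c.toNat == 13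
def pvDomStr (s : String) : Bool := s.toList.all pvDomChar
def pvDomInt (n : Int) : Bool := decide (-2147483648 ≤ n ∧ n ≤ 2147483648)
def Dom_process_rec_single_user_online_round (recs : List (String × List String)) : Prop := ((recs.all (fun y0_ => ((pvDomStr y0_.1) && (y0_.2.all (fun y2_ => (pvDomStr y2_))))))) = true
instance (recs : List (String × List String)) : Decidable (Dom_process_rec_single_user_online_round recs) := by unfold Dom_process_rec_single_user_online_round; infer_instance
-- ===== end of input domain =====

-- B replaces A's online best-rank tracking by grouping all (rank, item) occurrences per
-- user and reducing with first-minimum min-by-rank (alternative decomposition, same cost).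
-- A mutates its dict argument in place; the equivalence proved here is about the return value.


-- ===== PORT A =====
-- literal transliteration of A; the second Python loop walks recs.keys() and reassigns
-- recs[item], which for a dict (unique keys) is exactly a map over the entries.
def process_rec_single_user_online_round (recs : List (String × List String)) : List (String × List String) :=
  let user_item_ranks : PySem.Dict String (String × Int) :=
    recs.foldl (fun d p =>
      (p.2.foldl (fun (st : PySem.Dict String (String × Int) × Int) user =>
          let rank := st.2 + 1
          match st.1.get? user with
          | some best => if rank < best.2 then (st.1.insert user (p.1, rank), rank) else (st.1, rank)
          | none => (st.1.insert user (p.1, rank), rank)) (d, (0 : Int))).1)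
      PySem.Dict.empty
  recs.map (fun p =>
    (p.1, p.2.foldl (fun acc user =>
        if p.1 == (((user_item_ranks.get? user).getD ("", 0)).1) then acc ++ [user] else acc) []))

-- ===== PORT B =====
-- per_user[user] = per_user.get(user, []) + [(rank, item)]
def pvPerUser (recs : List (String × List String)) : PySem.Dict String (List (Int × String)) :=
  recs.foldl (fun d p =>
    (PySem.List.enumerate p.2 1).foldl (fun d2 ru => d2.modify ru.2 [] (· ++ [(ru.1, p.1)])) d)
    PySem.Dict.empty

-- min(per_user[u], key=lambda t: t[0])[1]
def pvWinner (recs : List (String × List String)) (u : String) : String :=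
  ((PySem.List.min? ((pvPerUser recs).getD u []) (fun t => t.1)).getD ((0 : Int), "")).2

def process_rec_single_user_online_round_alt (recs : List (String × List String)) : List (String × List String) :=
  recs.map (fun p => (p.1, p.2.filter (fun u => pvWinner recs u == p.1)))

-- ===== PRECONDITION & SPEC =====
def Spec_process_rec_single_user_online_round (recs : List (String × List String)) (out : List (String × List String)) : Prop := out = process_rec_single_user_online_round_alt recs
instance (recs : List (String × List String)) (out : List (String × List String)) : Decidable (Spec_process_rec_single_user_online_round recs out) := by unfold Spec_process_rec_single_user_online_round; infer_instance

-- ===== CLAIM (what is proved, stated in full; the proofs are below) =====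
def Claim_equal_process_rec_single_user_online_round : Prop := ∀ (recs : List (String × List String)), Dom_process_rec_single_user_online_round recs → Spec_process_rec_single_user_online_round recs (process_rec_single_user_online_round recs)

-- ===== LEMMAS AND PROOFS =====

-- the flat stream of (user, (rank, item)) occurrences, in traversal order
def pvOcc (recs : List (String × List String)) : List (String × (Int × String)) :=
  recs.flatMap (fun p => (PySem.List.enumerate p.2 1).map (fun ru => (ru.2, (ru.1, p.1))))

-- A's per-occurrence dict update
def pvUpdA (d : PySem.Dict String (String × Int)) (q : String × (Int × String)) :
    PySem.Dict String (String × Int) :=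
  match d.get? q.1 with
  | some best => if q.2.1 < best.2 then d.insert q.1 (q.2.2, q.2.1) else d
  | none => d.insert q.1 (q.2.2, q.2.1)

-- A's per-user step on the occurrence values
def pvStep (o : Option (String × Int)) (q : Int × String) : Option (String × Int) :=
  match o with
  | some best => if q.1 < best.2 then some (q.2, q.1) else some best
  | none => some (q.2, q.1)

-- A's inner loop with its manual rank counter is the fold over enumerate(users, r0+1)
theorem pvInnerA (item : String) (users : List String)
    (d : PySem.Dict String (String × Int)) (r0 : Int) :
    users.foldl (fun (st : PySem.Dict String (String × Int) × Int) user =>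
        let rank := st.2 + 1
        match st.1.get? user with
        | some best => if rank < best.2 then (st.1.insert user (item, rank), rank) else (st.1, rank)
        | none => (st.1.insert user (item, rank), rank)) (d, r0)
      = ((PySem.List.enumerate users (r0 + 1)).foldl
           (fun d2 ru => pvUpdA d2 (ru.2, (ru.1, item))) d, r0 + users.length) := by
  induction users generalizing d r0 with
  | nil => simp [PySem.List.enumerate_nil]
  | cons u t ih =>
      rw [PySem.List.enumerate_cons]
      simp only [List.foldl_cons]
      unfold pvUpdA
      cases h : d.get? u with
      | none =>
          simp only [h]
          rw [ih]
          refine Prod.ext rfl ?_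
          simp only [List.length_cons]; push_cast; omega
      | some best =>
          simp only [h]
          split <;>
          · rw [ih]
            refine Prod.ext rfl ?_
            simp only [List.length_cons]
            push_cast
            omega

-- A's whole first pass is the fold of pvUpdA over the flat occurrence stream
theorem pvPassA (recs : List (String × List String)) (d : PySem.Dict String (String × Int)) :
    recs.foldl (fun d p =>
      (p.2.foldl (fun (st : PySem.Dict String (String × Int) × Int) user =>
          let rank := st.2 + 1
          match st.1.get? user with
          | some best => if rank < best.2 then (st.1.insert user (p.1, rank), rank) else (st.1, rank)
          | none => (st.1.insert user (p.1, rank), rank)) (d, (0 : Int))).1) d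
      = (pvOcc recs).foldl pvUpdA d := by
  induction recs generalizing d with
  | nil => simp [pvOcc]
  | cons p t ih =>
      simp only [pvOcc, List.flatMap_cons, List.foldl_append, List.foldl_cons, List.foldl_map]
      rw [pvInnerA]
      simp only [zero_add]
      exact ih _

-- pointwise reading of the pvUpdA fold: per user it is the pvStep fold over that user's occurrences
theorem pvLookupA (l : List (String × (Int × String))) (d : PySem.Dict String (String × Int))
    (u : String) :
    (l.foldl pvUpdA d).get? u
      = ((l.filter (fun q => q.1 == u)).map (fun q => q.2)).foldl pvStep (d.get? u) := by
  induction l generalizing d with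
  | nil => simp
  | cons q t ih =>
      simp only [List.foldl_cons, List.filter_cons]
      by_cases hqu : q.1 = u
      · subst hqu
        simp only [BEq.rfl, if_true, List.map_cons, List.foldl_cons]
        rw [ih]
        congr 1
        unfold pvUpdA pvStep
        cases h : d.get? q.1 with
        | none => simp [PySem.Dict.get?_insert_self]
        | some best =>
            simp only [h]
            split <;> simp [h, PySem.Dict.get?_insert_self]
      · have hne : (q.1 == u) = false := by simp [hqu]
        simp only [hne, if_false]
        rw [ih]
        congr 1
        unfold pvUpdA
        cases h : d.get? q.1 with
        | none => simp [PySem.Dict.get?_insert_of_ne _ _ (fun h' => hqu h'.symm)]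
        | some best =>
            simp only [h]
            split <;> simp [PySem.Dict.get?_insert_of_ne _ _ (fun h' => hqu h'.symm)]

-- the reduction step of min(..., key=lambda t: t[0]) (first minimum wins)
def pvMinStep (acc : Option (Int × String)) (x : Int × String) : Option (Int × String) :=
  match acc with
  | none => some x
  | some m => if x.1 < m.1 then some x else some m

theorem pvMinEq (l : List (Int × String)) :
    PySem.List.min? l (fun t => t.1) = l.foldl pvMinStep none := by
  unfold PySem.List.min? pvMinStep
  congr 1
  funext acc x
  cases acc <;> rfl

-- the pvStep fold is min?-by-rank with the components swapped
theorem pvStepMin (l : List (Int × String)) (m : Int × String) :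
    l.foldl pvStep (some (m.2, m.1))
      = Option.map (fun x : Int × String => (x.2, x.1)) (l.foldl pvMinStep (some m)) := by
  induction l generalizing m with
  | nil => rfl
  | cons q t ih =>
      simp only [List.foldl_cons, pvStep, pvMinStep]
      by_cases hq : q.1 < m.1
      · simp only [hq, if_true]
        exact ih q
      · simp only [hq, if_false]
        exact ih m

-- B's grouping dict, read back per user, is that user's occurrence stream
theorem pvLookupB (recs : List (String × List String)) (u : String) :
    (pvPerUser recs).getD u []
      = ((pvOcc recs).filter (fun q => q.1 == u)).map (fun q => q.2) := by
  have h1 : pvPerUser recs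
      = (pvOcc recs).foldl (fun d q => d.modify q.1 [] (· ++ [q.2])) PySem.Dict.empty := by
    unfold pvPerUser pvOcc
    generalize PySem.Dict.empty = d0
    induction recs generalizing d0 with
    | nil => rfl
    | cons p t ih =>
        simp only [List.flatMap_cons, List.foldl_append, List.foldl_cons, List.foldl_map]
        rw [ih]
  rw [h1, PySem.Dict.getD_foldl_modify_append]
  simp

-- both programs pick the same winning item for every user
theorem pvWinnerEq (recs : List (String × List String)) (u : String) :
    ((((pvOcc recs).foldl pvUpdA PySem.Dict.empty).get? u).getD ("", 0)).1
      = pvWinner recs u := by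
  unfold pvWinner
  rw [pvLookupB, pvLookupA, pvMinEq]
  have h0 : (PySem.Dict.empty : PySem.Dict String (String × Int)).get? u = none := by simp
  rw [h0]
  cases hl : ((pvOcc recs).filter (fun q => q.1 == u)).map (fun q => q.2) with
  | nil => rfl
  | cons q t =>
      have hA : (q :: t).foldl pvStep none = t.foldl pvStep (some (q.2, q.1)) := rfl
      have hB : (q :: t).foldl pvMinStep none = t.foldl pvMinStep (some q) := rfl
      rw [hA, hB, pvStepMin]
      cases t.foldl pvMinStep (some q) <;> rfl

-- ===== VERDICT (by name: the statement is the Claim_ definition above) =====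
theorem process_rec_single_user_online_round_spec : Claim_equal_process_rec_single_user_online_round := by
  intro recs _
  unfold Spec_process_rec_single_user_online_round
  unfold process_rec_single_user_online_round process_rec_single_user_online_round_alt
  rw [pvPassA]
  apply List.map_congr_left
  intro p _
  refine Prod.ext rfl ?_
  rw [PySem.List.foldl_append_if_eq_filter]
  simp only [List.nil_append]
  apply List.filter_congr
  intro u _
  rw [pvWinnerEq]
  simp [eq_comm]
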